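-- pv_equiv track=rewrite | github.com/pratikpc/Symbiosis-AI-Hackathon | App/translator.py | merged_text
-- ===== SOURCE A (Python) =====
-- def merged_text(text):
--     text = text.split(' ')
--     text_res = []
--     for i in range(0, len(text),10):
--         text_cur = text[i: i+9]
--         text_cur = " ".join(text_cur)
--         text_res.append(text_cur)
--     text_res = "\n".join(text_res)
--     return text_res
-- ===== SOURCE B (Python) =====
-- def merged_text(text):
--     words = text.split(' ')
--     lines = []
--     for i, w in enumerate(words):
--         r = i % 10
--         if r == 0:
--             lines.append([w])
--         elif r < 9:
--             lines[-1].append(w)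
--     return "\n".join(" ".join(line) for line in lines)
-- ===== Notes on version B (the rewrite author's own statement) =====
-- stated objective: alternative
-- what changed: Instead of slicing fixed stride-10 chunks out of the word list, B makes a single enumerate pass over the words, starting a new line whenever the index is divisible by 10 and appending the word to the current line unless it is the 10th of its block.
import Mathlib
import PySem

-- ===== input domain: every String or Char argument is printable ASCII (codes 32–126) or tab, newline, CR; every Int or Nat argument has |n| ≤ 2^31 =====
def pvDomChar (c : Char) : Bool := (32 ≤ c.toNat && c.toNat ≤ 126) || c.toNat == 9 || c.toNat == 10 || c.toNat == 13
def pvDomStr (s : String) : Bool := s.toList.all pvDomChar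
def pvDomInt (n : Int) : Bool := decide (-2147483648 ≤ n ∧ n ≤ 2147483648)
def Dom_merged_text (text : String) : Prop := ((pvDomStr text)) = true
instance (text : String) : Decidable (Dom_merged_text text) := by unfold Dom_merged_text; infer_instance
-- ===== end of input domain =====

-- B replaces A's stride-10 slicing of the word list by a single enumerate pass that starts a new
-- line when the word index is divisible by 10 and drops every 10th word (objective: alternative).


-- ===== PORT A =====
-- text.split(' ') never raises (sep ≠ ""), so the getD default is unreachable
def merged_text (text : String) : String :=
  let ws := (PySem.Str.split? text " ").getD []
  let text_res := (PySem.List.pyRange 0 (ws.length : Int) 10).foldl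
    (fun acc i => acc ++ [PySem.Str.join " " (PySem.List.slice ws (some i) (some (i + 9)))]) []
  PySem.Str.join "\n" text_res

-- ===== PORT B =====
-- lines[-1].append(w): append w to the last line (unreachable on an empty lines list)
def mtAppendLast : List (List String) → String → List (List String)
  | [], _ => []
  | [l], w => [l ++ [w]]
  | l :: ls, w => l :: mtAppendLast ls w

-- one iteration of B's loop body
def mtStep (lines : List (List String)) (iw : Int × String) : List (List String) :=
  let r := PySem.Int.mod iw.1 10
  if r == 0 then lines ++ [[iw.2]]
  else if r < 9 then mtAppendLast lines iw.2
  else lines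

def merged_text_alt (text : String) : String :=
  let words := (PySem.Str.split? text " ").getD []
  let lines := (PySem.List.enumerate words).foldl mtStep []
  PySem.Str.join "\n" (lines.map (PySem.Str.join " "))

-- ===== PRECONDITION & SPEC =====
def Spec_merged_text (text : String) (out : String) : Prop := out = merged_text_alt text
instance (text : String) (out : String) : Decidable (Spec_merged_text text out) := by unfold Spec_merged_text; infer_instance

-- ===== CLAIM (what is proved, stated in full; the proofs are below) =====
def Claim_equal_merged_text : Prop := ∀ (text : String), Dom_merged_text text → Spec_merged_text text (merged_text text)

-- ===== LEMMAS AND PROOFS =====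

-- the common shape both programs compute: lines of 9 words, every 10th word dropped
def mtChunks (ws : List String) : List (List String) :=
  (List.range ((ws.length + 9) / 10)).map (fun k => (ws.drop (10 * k)).take 9)

theorem mtChunks_nil : mtChunks [] = [] := rfl

theorem mtChunks_cons (w : String) (rest : List String) :
    mtChunks (w :: rest) = (w :: rest.take 8) :: mtChunks (rest.drop 9) := by
  unfold mtChunks
  have hm : ((w :: rest).length + 9) / 10 = ((rest.drop 9).length + 9) / 10 + 1 := by
    simp only [List.length_drop, List.length_cons]; omega
  rw [hm, List.range_succ_eq_map, List.map_cons, List.map_map]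
  refine congrArg₂ List.cons ?_ ?_
  · simp [List.take_succ_cons]
  · apply List.map_congr_left
    intro k _
    simp only [Function.comp_apply]
    have h1 : 10 * Nat.succ k = (10 * k + 9) + 1 := by omega
    rw [h1, List.drop_succ_cons, List.drop_drop]
    congr 2
    omega

theorem mtAppendLast_append (acc : List (List String)) (cur : List String) (w : String) :
    mtAppendLast (acc ++ [cur]) w = acc ++ [cur ++ [w]] := by
  induction acc with
  | nil => rfl
  | cons a t ih =>
    cases t with
    | nil => rfl
    | cons b u => simpa [mtAppendLast] using ih

-- B's fold over enumerate builds mtChunks (joint invariant: at a fresh index, resp. inside a block)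
theorem mtFold_joint : ∀ (n : Nat) (ws : List String), ws.length ≤ n →
    (∀ (k : Nat) (acc : List (List String)), k % 10 = 0 →
      (PySem.List.enumerate ws (k : Int)).foldl mtStep acc = acc ++ mtChunks ws) ∧
    (∀ (k j : Nat) (acc : List (List String)) (cur : List String), k % 10 = j → 1 ≤ j → j ≤ 9 →
      (PySem.List.enumerate ws (k : Int)).foldl mtStep (acc ++ [cur]) =
        acc ++ (cur ++ ws.take (9 - j)) :: mtChunks (ws.drop (10 - j))) := by
  intro n
  induction n with
  | zero =>
    intro ws hlen
    have h0 : ws = [] := List.length_eq_zero_iff.mp (Nat.le_zero.mp hlen)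
    subst h0
    refine ⟨?_, ?_⟩ <;> intros <;> simp [PySem.List.enumerate, mtChunks_nil]
  | succ n ih =>
    intro ws hlen
    cases ws with
    | nil =>
      refine ⟨?_, ?_⟩ <;> intros <;> simp [PySem.List.enumerate, mtChunks_nil]
    | cons w rest =>
      have hrest : rest.length ≤ n := by simpa using hlen
      refine ⟨?_, ?_⟩
      · intro k acc hk
        rw [PySem.List.enumerate_cons, List.foldl_cons]
        have hmod : PySem.Int.mod ((k : Nat) : Int) 10 = ((k % 10 : Nat) : Int) := by
          exact_mod_cast PySem.Int.mod_natCast k 10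
        have hstep : mtStep acc ((k : Int), w) = acc ++ [[w]] := by
          simp only [mtStep]
          rw [hmod, hk]
          norm_num
        rw [hstep]
        have hsucc : ((k : Int) + 1) = ((k + 1 : Nat) : Int) := by push_cast; ring
        rw [hsucc, (ih rest hrest).2 (k + 1) 1 acc [w] (by omega) (by omega) (by omega),
          mtChunks_cons]
        norm_num
      · intro k j acc cur hk h1 h9
        rw [PySem.List.enumerate_cons, List.foldl_cons]
        have hmod : PySem.Int.mod ((k : Nat) : Int) 10 = ((k % 10 : Nat) : Int) := by
          exact_mod_cast PySem.Int.mod_natCast k 10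
        have hsucc : ((k : Int) + 1) = ((k + 1 : Nat) : Int) := by push_cast; ring
        by_cases hj9 : j = 9
        · subst hj9
          have hstep : mtStep (acc ++ [cur]) ((k : Int), w) = acc ++ [cur] := by
            simp only [mtStep]
            rw [hmod, hk]
            norm_num
          rw [hstep, hsucc, (ih rest hrest).1 (k + 1) (acc ++ [cur]) (by omega)]
          simp
        · have hA : ¬ (((j : Nat) : Int) = 0) := by
            have : (0 : Int) = ((0 : Nat) : Int) := by norm_num
            rw [this, Int.natCast_inj]; omega
          have hB : ((j : Nat) : Int) < 9 := by exact_mod_cast (show j < 9 by omega)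
          have hstep : mtStep (acc ++ [cur]) ((k : Int), w) = acc ++ [cur ++ [w]] := by
            simp only [mtStep]
            rw [hmod, hk]
            simp [hB, mtAppendLast_append]
            omega
          rw [hstep, hsucc,
            (ih rest hrest).2 (k + 1) (j + 1) acc (cur ++ [w]) (by omega) (by omega) (by omega)]
          have ht : (w :: rest).take (9 - j) = w :: rest.take (9 - (j + 1)) := by
            have h : 9 - j = (9 - (j + 1)) + 1 := by omega
            rw [h, List.take_succ_cons]
          have hd : (w :: rest).drop (10 - j) = rest.drop (10 - (j + 1)) := by
            have h : 10 - j = (10 - (j + 1)) + 1 := by omega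
            rw [h, List.drop_succ_cons]
          rw [ht, hd]
          simp

-- A's fold over the stride-10 range produces the joined chunks
theorem mtA_eq (ws : List String) :
    (PySem.List.pyRange 0 (ws.length : Int) 10).foldl
      (fun acc i => acc ++ [PySem.Str.join " " (PySem.List.slice ws (some i) (some (i + 9)))]) [] =
    (mtChunks ws).map (PySem.Str.join " ") := by
  rw [PySem.List.foldl_append_singleton_eq_map, List.nil_append]
  rw [PySem.List.pyRange_of_pos 0 (ws.length : Int) (by norm_num)]
  have hif : (if (0 : Int) < (ws.length : Int) then (((ws.length : Int) - 0 + 10 - 1) / 10).toNat else 0)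
      = (ws.length + 9) / 10 := by
    split_ifs with h
    · omega
    · have : ws.length = 0 := by omega
      omega
  rw [hif]
  unfold mtChunks
  rw [List.map_map, List.map_map]
  apply List.map_congr_left
  intro k _
  simp only [Function.comp_apply, zero_add]
  have h1 : (10 : Int) * (k : Nat) = ((10 * k : Nat) : Int) := by push_cast; ring
  have h2 : ((10 * k : Nat) : Int) + 9 = ((10 * k : Nat) : Int) + ((9 : Nat) : Int) := by norm_num
  rw [h1, h2, PySem.List.slice_natCast_add]

-- ===== VERDICT (by name: the statement is the Claim_ definition above) =====
theorem merged_text_spec : Claim_equal_merged_text := by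
  intro text _
  unfold Spec_merged_text merged_text merged_text_alt
  dsimp only
  rw [mtA_eq,
    show ((0 : Int) = ((0 : Nat) : Int)) by norm_num,
    (mtFold_joint ((PySem.Str.split? text " ").getD []).length
      ((PySem.Str.split? text " ").getD []) (le_refl _)).1 0 [] (by omega)]
  simp
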